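-- pv_equiv track=rewrite | github.com/diana12131990/adventOfCode | 2023/Day11/day_11_2.py | GetStarPos
-- ===== SOURCE A (Python) =====
-- def GetStarPos(pos,no_star_list):
--     new_pos = pos
--     for index in range(len(no_star_list)-1):
--         index += 1
--         if no_star_list[index-1] < pos < no_star_list[index]:
--             new_pos += index*999999
--             break
--         elif index == len(no_star_list)-1 and pos > no_star_list[index]:
--             new_pos += len(no_star_list)*999999
--     return new_pos
-- ===== SOURCE B (Python) =====
-- import bisect
--
-- def GetStarPos(pos, no_star_list):
--     # Binary search: count of empty positions strictly below pos, times the expansion factor.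
--     return pos + 999999 * bisect.bisect_left(no_star_list, pos)
-- ===== Notes on version B (the rewrite author's own statement) =====
-- stated objective: idiomatic
-- what changed: Replaces A's linear scan for a bracketing pair of neighbours with a single bisect_left binary search counting the empty rows below pos, multiplied by the expansion factor.
-- intended difference: On sorted lists with an empty row below pos where A's neighbour bracket can never fire - pos itself in the list, or a one-element list (range(len-1) is empty) - A returns pos with no offset, while B returns pos plus 999999 per empty row below pos, the intended expansion. — e.g. on GetStarPos(5, [1]): A returns 5, B returns 1000004
-- outside the precondition, e.g. on GetStarPos(1, [0, 1, 0]): A returns 2999998, B returns 1000000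
import Mathlib
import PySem

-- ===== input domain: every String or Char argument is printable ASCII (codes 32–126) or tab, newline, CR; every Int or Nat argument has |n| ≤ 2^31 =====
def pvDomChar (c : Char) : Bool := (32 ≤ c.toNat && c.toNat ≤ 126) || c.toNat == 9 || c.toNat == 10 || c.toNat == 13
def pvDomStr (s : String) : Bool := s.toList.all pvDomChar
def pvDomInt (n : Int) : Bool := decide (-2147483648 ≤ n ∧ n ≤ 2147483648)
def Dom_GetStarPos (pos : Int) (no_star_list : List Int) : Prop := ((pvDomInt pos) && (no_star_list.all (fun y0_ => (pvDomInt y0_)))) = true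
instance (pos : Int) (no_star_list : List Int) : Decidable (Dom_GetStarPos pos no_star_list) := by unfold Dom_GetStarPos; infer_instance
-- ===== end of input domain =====

-- B replaces A's left-to-right neighbour-bracket scan by the stdlib bisect_left binary
-- search (count of empty rows below pos, times 999999) — the idiomatic way to rank into a
-- sorted list; agreement is claimed on Pre_ outside D_ below.

-- ===== PORT A =====
-- the loop body; the index list is range(len(no_star_list)-1), Python's `index += 1`
-- becomes `let index := i + 1`; `break` is a direct return.  All list indices reached are
-- in range on every input (i+1 ≤ len-1), so `getD _ 0` is exact where Python indexes.
def GetStarPosLoop (pos : Int) (no_star_list : List Int) (idxs : List Nat) (new_pos : Int) : Int :=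
  match idxs with
  | [] => new_pos
  | i :: rest =>
    let index := i + 1
    if no_star_list.getD (index - 1) 0 < pos ∧ pos < no_star_list.getD index 0 then
      new_pos + (index : Int) * 999999
    else if index = no_star_list.length - 1 ∧ no_star_list.getD index 0 < pos then
      GetStarPosLoop pos no_star_list rest (new_pos + (no_star_list.length : Int) * 999999)
    else
      GetStarPosLoop pos no_star_list rest new_pos

def GetStarPos (pos : Int) (no_star_list : List Int) : Int :=
  GetStarPosLoop pos no_star_list (List.range (no_star_list.length - 1)) pos

-- ===== PORT B =====
-- hand port of bisect.bisect_left (CPython's `while lo < hi` halving loop); the structural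
-- fuel parameter only bounds the iteration count (hi - lo shrinks each step, so len suffices)
def bisectLeftGo (a : List Int) (x : Int) (fuel lo hi : Nat) : Nat :=
  match fuel with
  | 0 => lo
  | fuel + 1 =>
    if lo < hi then
      let mid := (lo + hi) / 2
      if a.getD mid 0 < x then bisectLeftGo a x fuel (mid + 1) hi
      else bisectLeftGo a x fuel lo mid
    else lo

def bisectLeft (a : List Int) (x : Int) : Nat := bisectLeftGo a x a.length 0 a.length

def GetStarPos_alt (pos : Int) (no_star_list : List Int) : Int :=
  pos + 999999 * (bisectLeft no_star_list pos : Int)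

-- ===== PRECONDITION & SPEC =====
-- Pre_ covers the helper's natural domain (a sorted list of empty-row indices, as in the
-- Day-11 caller) plus every list, sorted or not, whose entries all lie on one side of pos
-- (there element order cannot matter); on the remaining unsorted lists A's neighbour-bracket
-- scan returns accidental values no specification would fix.
def Pre_GetStarPos (pos : Int) (no_star_list : List Int) : Prop :=
  no_star_list.Pairwise (· ≤ ·) ∨ (∀ y ∈ no_star_list, pos ≤ y) ∨ (∀ y ∈ no_star_list, y < pos)
instance (pos : Int) (no_star_list : List Int) : Decidable (Pre_GetStarPos pos no_star_list) := by
  unfold Pre_GetStarPos; infer_instance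

def pvWitness_GetStarPos : Int × List Int := (4, [1, 3, 7])

-- On sorted lists with an empty row below pos whose bracket scan cannot fire — pos itself in
-- the list, or a one-element list (range(len-1) is empty) — A returns pos with no offset,
-- while B returns pos + 999999 per empty row below pos, the intended expansion.
def D_GetStarPos (pos : Int) (no_star_list : List Int) : Prop :=
  (pos ∈ no_star_list ∨ no_star_list.length = 1) ∧ ∃ y ∈ no_star_list, y < pos
instance (pos : Int) (no_star_list : List Int) : Decidable (D_GetStarPos pos no_star_list) := by
  unfold D_GetStarPos; infer_instance

def Spec_GetStarPos (pos : Int) (no_star_list : List Int) (out : Int) : Prop :=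
  ¬ D_GetStarPos pos no_star_list → out = GetStarPos_alt pos no_star_list
instance (pos : Int) (no_star_list : List Int) (out : Int) : Decidable (Spec_GetStarPos pos no_star_list out) := by
  unfold Spec_GetStarPos; infer_instance

def pvDiffWitness_GetStarPos : Int × List Int := (5, [1])
def pvDiffWitnessOut_GetStarPos : Int × Int := (5, 1000004)

-- ===== CLAIM (what is proved, stated in full; the proofs are below) =====
def Claim_unchanged_GetStarPos : Prop := ∀ (pos : Int) (no_star_list : List Int), Dom_GetStarPos pos no_star_list → Pre_GetStarPos pos no_star_list → Spec_GetStarPos pos no_star_list (GetStarPos pos no_star_list)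
def Claim_changed_GetStarPos : Prop := Dom_GetStarPos (pvDiffWitness_GetStarPos.1) (pvDiffWitness_GetStarPos.2) ∧ Pre_GetStarPos (pvDiffWitness_GetStarPos.1) (pvDiffWitness_GetStarPos.2) ∧ D_GetStarPos (pvDiffWitness_GetStarPos.1) (pvDiffWitness_GetStarPos.2) ∧ GetStarPos (pvDiffWitness_GetStarPos.1) (pvDiffWitness_GetStarPos.2) = pvDiffWitnessOut_GetStarPos.1 ∧ GetStarPos_alt (pvDiffWitness_GetStarPos.1) (pvDiffWitness_GetStarPos.2) = pvDiffWitnessOut_GetStarPos.2 ∧ pvDiffWitnessOut_GetStarPos.1 ≠ pvDiffWitnessOut_GetStarPos.2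
def Claim_exact_GetStarPos : Prop := ∀ (pos : Int) (no_star_list : List Int), Dom_GetStarPos pos no_star_list → Pre_GetStarPos pos no_star_list → D_GetStarPos pos no_star_list → GetStarPos pos no_star_list ≠ GetStarPos_alt pos no_star_list

-- ===== LEMMAS AND PROOFS =====

-- For a nondecreasing list, `x[i] < pos` holds exactly for the first `countP (· < pos)` indices.
lemma countP_char (x : Int) : ∀ (l : List Int), l.Pairwise (· ≤ ·) →
    ∀ i, i < l.length → (l.getD i 0 < x ↔ i < l.countP (fun y => decide (y < x))) := by
  intro l hl
  induction l with
  | nil => intro i hi; simp at hi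
  | cons a t ih =>
    rcases List.pairwise_cons.mp hl with ⟨ha, ht⟩
    intro i hi
    by_cases hax : a < x
    · have hc : (a :: t).countP (fun y => decide (y < x)) = t.countP (fun y => decide (y < x)) + 1 := by
        simp [hax]
      cases i with
      | zero => simp [hc, hax]
      | succ j =>
        have hj : j < t.length := by simpa using hi
        simp only [List.getD_cons_succ, hc]
        rw [ih ht j hj]; omega
    · have ht0 : t.countP (fun y => decide (y < x)) = 0 := by
        rw [List.countP_eq_zero]
        intro b hb
        have := ha b hb
        simp; omega
      have hc : (a :: t).countP (fun y => decide (y < x)) = 0 := by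
        simp [hax, ht0]
      rw [hc]
      cases i with
      | zero => simpa using hax
      | succ j =>
        have hj : j < t.length := by simpa using hi
        have hb : t.getD j 0 ∈ t := by
          rw [List.getD_eq_getElem _ _ hj]; exact List.getElem_mem hj
        have := ha _ hb
        simp only [List.getD_cons_succ]
        constructor
        · intro h2; omega
        · omega

lemma getD_mono (xs : List Int) (h : xs.Pairwise (· ≤ ·)) (i j : Nat)
    (hij : i ≤ j) (hj : j < xs.length) : xs.getD i 0 ≤ xs.getD j 0 := by
  rcases Nat.eq_or_lt_of_le hij with rfl | hlt
  · exact le_refl _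
  · rw [List.getD_eq_getElem _ _ (by omega), List.getD_eq_getElem _ _ hj]
    exact List.pairwise_iff_getElem.mp h i j (by omega) hj hlt

lemma bisectLeftGo_eq (a : List Int) (x : Int) (c : Nat)
    (hchar : ∀ i, i < a.length → (a.getD i 0 < x ↔ i < c)) :
    ∀ d lo hi, hi - lo ≤ d → hi ≤ a.length → lo ≤ c → c ≤ hi → bisectLeftGo a x d lo hi = c := by
  intro d
  induction d with
  | zero =>
    intro lo hi hd hlen hlo hhi
    rw [bisectLeftGo]
    omega
  | succ d ih =>
    intro lo hi hd hlen hlo hhi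
    rw [bisectLeftGo]
    by_cases h : lo < hi
    · simp only [h, if_pos]
      have hmid1 : lo ≤ (lo + hi) / 2 := by omega
      have hmid2 : (lo + hi) / 2 < hi := by omega
      have hmlen : (lo + hi) / 2 < a.length := by omega
      by_cases hm : a.getD ((lo + hi) / 2) 0 < x
      · have : (lo + hi) / 2 < c := (hchar _ hmlen).mp hm
        rw [if_pos hm]
        exact ih _ _ (by omega) hlen (by omega) hhi
      · have : ¬ (lo + hi) / 2 < c := fun hc => hm ((hchar _ hmlen).mpr hc)
        rw [if_neg hm]
        exact ih _ _ (by omega) (by omega) hlo (by omega)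
    · simp [h]; omega

lemma bisectLeft_eq (a : List Int) (x : Int) (c : Nat)
    (hc : c ≤ a.length)
    (hchar : ∀ i, i < a.length → (a.getD i 0 < x ↔ i < c)) :
    bisectLeft a x = c :=
  bisectLeftGo_eq a x c hchar a.length 0 a.length (by omega) le_rfl (by omega) hc

-- if no bracket pair fires and the last element is not below pos, the loop leaves new_pos alone
lemma loop_no_fire (pos : Int) (xs : List Int)
    (hbr : ∀ i, i + 1 < xs.length → ¬(xs.getD i 0 < pos ∧ pos < xs.getD (i + 1) 0))
    (hlast : ¬ xs.getD (xs.length - 1) 0 < pos) :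
    ∀ m k np, k + m = xs.length - 1 → GetStarPosLoop pos xs (List.range' k m) np = np := by
  intro m
  induction m with
  | zero => intro k np hk; simp [List.range', GetStarPosLoop]
  | succ m ih =>
    intro k np hk
    rw [List.range'_succ]
    simp only [GetStarPosLoop]
    have hk1 : k + 1 < xs.length := by omega
    have h2 : ¬ (k + 1 = xs.length - 1 ∧ xs.getD (k + 1) 0 < pos) := by
      rintro ⟨he, hl⟩
      rw [he] at hl
      exact hlast hl
    have hgk : xs.getD (k + 1 - 1) 0 = xs.getD k 0 := rfl
    rw [hgk, if_neg (hbr k hk1), if_neg h2]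
    exact ih (k + 1) np (by omega)

-- the loop over the remaining raw indices k..k+m-1 (index values k+1..k+m), pos not in the list
lemma loop_eq (pos : Int) (xs : List Int)
    (hpos : pos ∉ xs)
    (hchar : ∀ i, i < xs.length → (xs.getD i 0 < pos ↔ i < xs.countP (fun y => decide (y < pos)))) :
    ∀ m k np, k + m = xs.length - 1 →
      (k < xs.length - 1 ∨ xs.countP (fun y => decide (y < pos)) ≤ k) →
      GetStarPosLoop pos xs (List.range' k m) np =
        np + (if k < xs.countP (fun y => decide (y < pos))
              then (xs.countP (fun y => decide (y < pos)) : Int) * 999999 else 0) := by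
  set c := xs.countP (fun y => decide (y < pos)) with hcdef
  have hcle : c ≤ xs.length := List.countP_le_length
  intro m
  induction m with
  | zero =>
    intro k np hk hcond
    simp only [List.range', GetStarPosLoop]
    have : ¬ k < c := by omega
    simp [this]
  | succ m ih =>
    intro k np hk hcond
    have hklen : k + 1 < xs.length := by omega
    have hkl : k < xs.length := by omega
    rw [List.range'_succ]
    simp only [GetStarPosLoop]
    have hgk : xs.getD (k + 1 - 1) 0 = xs.getD k 0 := rfl
    have hbr : (xs.getD (k + 1 - 1) 0 < pos ∧ pos < xs.getD (k + 1) 0) ↔ c = k + 1 := by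
      rw [hgk]
      constructor
      · rintro ⟨h1, h2⟩
        have hkc : k < c := (hchar k hkl).mp h1
        have h3 : ¬ (k + 1 < c) := by
          intro hcc
          have := (hchar (k + 1) hklen).mpr hcc
          omega
        omega
      · intro hceq
        refine ⟨(hchar k hkl).mpr (by omega), ?_⟩
        have hnot : ¬ xs.getD (k + 1) 0 < pos := by
          intro hx
          have := (hchar (k + 1) hklen).mp hx
          omega
        have hmem : xs.getD (k + 1) 0 ∈ xs := by
          rw [List.getD_eq_getElem _ _ hklen]; exact List.getElem_mem hklen
        have hne : pos ≠ xs.getD (k + 1) 0 := fun hx => hpos (hx ▸ hmem)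
        omega
    by_cases hc : c = k + 1
    · rw [if_pos (hbr.mpr hc)]
      rw [if_pos (show k < c by omega), hc]
    · rw [if_neg (fun hx => hc (hbr.mp hx))]
      have hlastiff : k + 1 = xs.length - 1 → (xs.getD (k + 1) 0 < pos ↔ c = xs.length) := by
        intro hk1
        rw [hchar (k + 1) hklen]
        omega
      by_cases hel : k + 1 = xs.length - 1 ∧ xs.getD (k + 1) 0 < pos
      · rw [if_pos hel]
        have hcl : c = xs.length := (hlastiff hel.1).mp hel.2
        have hm0 : m = 0 := by omega
        subst hm0
        simp only [List.range', GetStarPosLoop]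
        rw [if_pos (show k < c by omega), hcl]
      · rw [if_neg hel]
        have hcond' : k + 1 < xs.length - 1 ∨ c ≤ k + 1 := by
          by_cases hk1 : k + 1 = xs.length - 1
          · right
            have hnl : ¬ xs.getD (k + 1) 0 < pos := fun hx => hel ⟨hk1, hx⟩
            have : ¬ c = xs.length := fun hx => hnl ((hlastiff hk1).mpr hx)
            omega
          · left; omega
        rw [ih (k + 1) np (by omega) hcond']
        by_cases h : k + 1 < c
        · rw [if_pos h, if_pos (show k < c by omega)]
        · rw [if_neg h, if_neg (show ¬ k < c by omega)]

-- if every element is below pos, the elif branch fires at the last index and nowhere else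
lemma loop_all (pos : Int) (xs : List Int)
    (hall : ∀ y ∈ xs, y < pos) :
    ∀ m k np, 1 ≤ m → k + m = xs.length - 1 →
      GetStarPosLoop pos xs (List.range' k m) np = np + (xs.length : Int) * 999999 := by
  intro m
  induction m with
  | zero => intro k np h1 _; exact absurd h1 (by omega)
  | succ m ih =>
    intro k np _ hk
    rw [List.range'_succ]
    simp only [GetStarPosLoop]
    have hk1 : k + 1 < xs.length := by omega
    have hmem : xs.getD (k + 1) 0 ∈ xs := by
      rw [List.getD_eq_getElem _ _ hk1]; exact List.getElem_mem hk1
    have hlt1 : xs.getD (k + 1) 0 < pos := hall _ hmem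
    have hbneg : ¬ (xs.getD (k + 1 - 1) 0 < pos ∧ pos < xs.getD (k + 1) 0) := by
      rintro ⟨_, h2⟩; omega
    rw [if_neg hbneg]
    cases m with
    | zero =>
      rw [if_pos ⟨by omega, hlt1⟩]
      simp [List.range', GetStarPosLoop]
    | succ m' =>
      have hne : ¬ (k + 1 = xs.length - 1 ∧ xs.getD (k + 1) 0 < pos) := by
        rintro ⟨he, _⟩; omega
      rw [if_neg hne]
      exact ih (k + 1) np (by omega) (by omega)

lemma main_eq_sorted (pos : Int) (xs : List Int)
    (hsort : xs.Pairwise (· ≤ ·)) (hnd : ¬ D_GetStarPos pos xs) :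
    GetStarPos pos xs = GetStarPos_alt pos xs := by
  have hchar := countP_char pos xs hsort
  set c := xs.countP (fun y => decide (y < pos)) with hcdef
  have hcle : c ≤ xs.length := List.countP_le_length
  have halt : GetStarPos_alt pos xs = pos + 999999 * (c : Int) := by
    unfold GetStarPos_alt
    rw [bisectLeft_eq xs pos c hcle hchar]
  rw [halt]
  by_cases hc0 : c = 0
  · rw [hc0]
    have hA : GetStarPos pos xs = pos := by
      cases xs with
      | nil => rfl
      | cons a t =>
        unfold GetStarPos
        rw [List.range_eq_range']
        apply loop_no_fire pos (a :: t) ?_ ?_ ((a :: t).length - 1) 0 pos (by omega)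
        · intro i hi hcontra
          have := (hchar i (by omega)).mp hcontra.1
          omega
        · intro hx
          have hlt : (a :: t).length - 1 < (a :: t).length := by simp
          have := (hchar ((a :: t).length - 1) hlt).mp hx
          omega
    rw [hA]; norm_num
  · have hex : ∃ y ∈ xs, y < pos := by
      by_contra hno
      push_neg at hno
      refine hc0 (List.countP_eq_zero.mpr ?_)
      intro y hy
      have := hno y hy
      simp; omega
    have hnmem : pos ∉ xs ∧ xs.length ≠ 1 := by
      constructor
      · intro hmem; exact hnd ⟨Or.inl hmem, hex⟩
      · intro h1; exact hnd ⟨Or.inr h1, hex⟩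
    have hlen2 : 2 ≤ xs.length := by
      have : 1 ≤ xs.length := by omega
      rcases Nat.lt_or_ge xs.length 2 with h | h
      · exact absurd (by omega : xs.length = 1) hnmem.2
      · exact h
    unfold GetStarPos
    rw [List.range_eq_range']
    rw [loop_eq pos xs hnmem.1 hchar (xs.length - 1) 0 pos (by omega) (Or.inl (by omega))]
    rw [if_pos (by omega : 0 < c)]
    ring

lemma main_eq (pos : Int) (xs : List Int)
    (hpre : Pre_GetStarPos pos xs) (hnd : ¬ D_GetStarPos pos xs) :
    GetStarPos pos xs = GetStarPos_alt pos xs := by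
  rcases hpre with hsort | hge | hlt
  · exact main_eq_sorted pos xs hsort hnd
  · -- every element is ≥ pos: both sides return pos
    have hc0 : xs.countP (fun y => decide (y < pos)) = 0 := by
      rw [List.countP_eq_zero]
      intro y hy
      have := hge y hy
      simp; omega
    have halt : GetStarPos_alt pos xs = pos := by
      unfold GetStarPos_alt
      rw [bisectLeft_eq xs pos 0 (by omega) ?_]
      · norm_num
      · intro i hi
        have hmem : xs.getD i 0 ∈ xs := by
          rw [List.getD_eq_getElem _ _ hi]; exact List.getElem_mem hi
        have := hge _ hmem
        constructor
        · intro h; omega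
        · intro h; omega
    rw [halt]
    cases xs with
    | nil => rfl
    | cons a t =>
      unfold GetStarPos
      rw [List.range_eq_range']
      apply loop_no_fire pos (a :: t) ?_ ?_ ((a :: t).length - 1) 0 pos (by omega)
      · rintro i hi ⟨h1, _⟩
        have hmem : (a :: t).getD i 0 ∈ a :: t := by
          rw [List.getD_eq_getElem _ _ (by omega)]; exact List.getElem_mem (by omega)
        have := hge _ hmem
        omega
      · intro hx
        have hilt : (a :: t).length - 1 < (a :: t).length := by simp
        have hmem : (a :: t).getD ((a :: t).length - 1) 0 ∈ a :: t := by
          rw [List.getD_eq_getElem _ _ hilt]; exact List.getElem_mem hilt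
        have := hge _ hmem
        omega
  · -- every element is < pos: both sides add length * 999999
    have hcl : xs.countP (fun y => decide (y < pos)) = xs.length := by
      rw [List.countP_eq_length]
      intro y hy
      simpa using hlt y hy
    have halt : GetStarPos_alt pos xs = pos + 999999 * (xs.length : Int) := by
      unfold GetStarPos_alt
      rw [bisectLeft_eq xs pos xs.length le_rfl ?_]
      intro i hi
      have hmem : xs.getD i 0 ∈ xs := by
        rw [List.getD_eq_getElem _ _ hi]; exact List.getElem_mem hi
      have := hlt _ hmem
      constructor
      · intro _; omega
      · intro _; omega
    rw [halt]
    rcases Nat.lt_or_ge xs.length 2 with hsmall | hbig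
    · rcases Nat.lt_or_ge xs.length 1 with h0 | h1
      · -- empty list
        have : xs = [] := List.length_eq_zero_iff.mp (by omega)
        subst this
        norm_num
        rfl
      · -- singleton: inside D_, contradiction with hnd
        have hlen1 : xs.length = 1 := by omega
        obtain ⟨a, rfl⟩ := List.length_eq_one_iff.mp hlen1
        exact absurd ⟨Or.inr hlen1, ⟨a, by simp, hlt a (by simp)⟩⟩ hnd
    · unfold GetStarPos
      rw [List.range_eq_range']
      rw [loop_all pos xs hlt (xs.length - 1) 0 pos (by omega) (by omega)]
      ring

-- ===== VERDICT (by name: the statement is the Claim_ definition above) =====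
theorem GetStarPos_spec : Claim_unchanged_GetStarPos := by
  intro pos xs _ hpre hnd
  exact main_eq pos xs hpre hnd

theorem GetStarPos_changed : Claim_changed_GetStarPos := by
  unfold Claim_changed_GetStarPos pvDiffWitness_GetStarPos pvDiffWitnessOut_GetStarPos
  refine ⟨by decide, by decide, by decide, rfl, ?_, by decide⟩
  show (5 : Int) + 999999 * ((bisectLeft [1] 5 : Nat) : Int) = 1000004
  rw [bisectLeft_eq [1] 5 1 (by simp) (by intro i hi; simp at hi; subst hi; simp)]
  norm_num

theorem GetStarPos_tight : Claim_exact_GetStarPos := by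
  intro pos xs _ hpre hd
  obtain ⟨hor, hex⟩ := hd
  have hsort : xs.Pairwise (· ≤ ·) := by
    rcases hpre with h | h | h
    · exact h
    · obtain ⟨y0, hy0, hy0lt⟩ := hex
      exact absurd (h y0 hy0) (by omega)
    · rcases hor with hmem | hlen1
      · exact absurd (h pos hmem) (by omega)
      · obtain ⟨a, rfl⟩ := List.length_eq_one_iff.mp hlen1
        simp
  have hchar := countP_char pos xs hsort
  set c := xs.countP (fun y => decide (y < pos)) with hcdef
  have hcle : c ≤ xs.length := List.countP_le_length
  have hc1 : 0 < c := by
    obtain ⟨y, hy, hlt⟩ := hex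
    by_contra h
    have hz : c = 0 := by omega
    have := List.countP_eq_zero.mp hz y hy
    simp at this
    omega
  have halt : GetStarPos_alt pos xs = pos + 999999 * (c : Int) := by
    unfold GetStarPos_alt
    rw [bisectLeft_eq xs pos c hcle hchar]
  have hA : GetStarPos pos xs = pos := by
    rcases hor with hmem | hlen1
    · obtain ⟨j, hj, hje⟩ := List.mem_iff_getElem.mp hmem
      have hjD : xs.getD j 0 = pos := by rw [List.getD_eq_getElem _ _ hj, hje]
      have hcj : c ≤ j := by
        by_contra hlt
        have h1 : xs.getD j 0 < pos := (hchar j hj).mpr (by omega)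
        omega
      unfold GetStarPos
      rw [List.range_eq_range']
      apply loop_no_fire pos xs ?_ ?_ (xs.length - 1) 0 pos (by omega)
      · rintro i hi ⟨h1, h2⟩
        have hic : i < c := (hchar i (by omega)).mp h1
        have hij : i + 1 ≤ j := by omega
        have := getD_mono xs hsort (i + 1) j hij hj
        omega
      · intro hx
        have := (hchar (xs.length - 1) (by omega)).mp hx
        omega
    · obtain ⟨a, rfl⟩ := List.length_eq_one_iff.mp hlen1
      rfl
  rw [hA, halt]
  have : (1 : Int) ≤ (c : Int) := by exact_mod_cast hc1
  intro hcontra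
  omega
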